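-- pv_equiv track=rewrite | github.com/JohanLondono/parcial2-vision_artificial | modules/object_detection.py | _calcular_bbox_semaforo
-- ===== SOURCE A (Python) =====
-- def _calcular_bbox_semaforo(grupo_circulos):
--     """Calcular bounding box de un grupo de círculos."""
--     if not grupo_circulos:
--         return (0, 0, 0, 0)
--
--     x_coords = [x for x, y, r in grupo_circulos]
--     y_coords = [y for x, y, r in grupo_circulos]
--     radios = [r for x, y, r in grupo_circulos]
--
--     x_min = min(x_coords) - max(radios)
--     x_max = max(x_coords) + max(radios)
--     y_min = min(y_coords) - max(radios)
--     y_max = max(y_coords) + max(radios)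
--
--     return (int(x_min), int(y_min), int(x_max - x_min), int(y_max - y_min))
-- ===== SOURCE B (Python) =====
-- def _calcular_bbox_semaforo(grupo_circulos):
--     """Calcular bounding box de un grupo de circulos (via sorted extremes)."""
--     if not grupo_circulos:
--         return (0, 0, 0, 0)
--     xs = sorted(x for x, _, _ in grupo_circulos)
--     ys = sorted(y for _, y, _ in grupo_circulos)
--     rs = sorted(r for _, _, r in grupo_circulos)
--     r_max = rs[-1]
--     x_min = xs[0] - r_max
--     x_max = xs[-1] + r_max
--     y_min = ys[0] - r_max
--     y_max = ys[-1] + r_max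
--     return (int(x_min), int(y_min), int(x_max - x_min), int(y_max - y_min))
-- ===== Notes on version B (the rewrite author's own statement) =====
-- stated objective: alternative
-- what changed: Instead of six min/max scans over three comprehension lists, B sorts each coordinate list once and reads the bbox extremes off the sorted endpoints (first/last element), padding with the last element of the sorted radii.
import Mathlib
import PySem

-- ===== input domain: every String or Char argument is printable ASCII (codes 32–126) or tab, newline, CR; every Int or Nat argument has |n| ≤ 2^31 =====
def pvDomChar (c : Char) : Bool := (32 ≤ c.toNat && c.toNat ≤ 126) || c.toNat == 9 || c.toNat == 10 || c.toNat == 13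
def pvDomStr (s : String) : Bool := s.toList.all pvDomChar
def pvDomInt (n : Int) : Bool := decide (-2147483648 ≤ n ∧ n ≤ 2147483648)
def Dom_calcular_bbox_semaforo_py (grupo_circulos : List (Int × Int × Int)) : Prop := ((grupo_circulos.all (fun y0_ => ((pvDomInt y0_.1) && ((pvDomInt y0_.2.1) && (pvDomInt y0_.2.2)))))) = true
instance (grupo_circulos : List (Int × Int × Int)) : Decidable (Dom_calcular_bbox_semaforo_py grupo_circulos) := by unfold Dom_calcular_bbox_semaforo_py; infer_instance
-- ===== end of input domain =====

-- B reads the bbox extremes off sorted coordinate lists (first/last of sorted) instead of A's comprehensions + min/max scans; same values everywhere (alternative decomposition, not claimed faster).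


-- ===== PORT A =====
-- Literal port of A: empty sentinel, three comprehensions (maps), six min/max scans.
-- The lists are nonempty here, so PySem.List.min?/max? are `some`; `.getD 0` only makes the port total.
def calcular_bbox_semaforo_py (grupo_circulos : List (Int × Int × Int)) : Int × Int × Int × Int :=
  if grupo_circulos = [] then (0, 0, 0, 0)
  else
    let x_coords := grupo_circulos.map (fun p => p.1)
    let y_coords := grupo_circulos.map (fun p => p.2.1)
    let radios := grupo_circulos.map (fun p => p.2.2)
    let x_min := (PySem.List.min? x_coords (fun v => v)).getD 0 - (PySem.List.max? radios (fun v => v)).getD 0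
    let x_max := (PySem.List.max? x_coords (fun v => v)).getD 0 + (PySem.List.max? radios (fun v => v)).getD 0
    let y_min := (PySem.List.min? y_coords (fun v => v)).getD 0 - (PySem.List.max? radios (fun v => v)).getD 0
    let y_max := (PySem.List.max? y_coords (fun v => v)).getD 0 + (PySem.List.max? radios (fun v => v)).getD 0
    (x_min, y_min, x_max - x_min, y_max - y_min)

-- ===== PORT B =====
-- Port of B: sort each coordinate list ascending, read xs[0], xs[-1], ys[0], ys[-1], rs[-1].
-- The sorted lists are nonempty here, so `.pyGet?` is `some`; `.getD 0` only makes the port total.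
def calcular_bbox_semaforo_py_alt (grupo_circulos : List (Int × Int × Int)) : Int × Int × Int × Int :=
  if grupo_circulos = [] then (0, 0, 0, 0)
  else
    let xs := PySem.List.sorted (grupo_circulos.map (fun p => p.1)) (fun v => v) false
    let ys := PySem.List.sorted (grupo_circulos.map (fun p => p.2.1)) (fun v => v) false
    let rs := PySem.List.sorted (grupo_circulos.map (fun p => p.2.2)) (fun v => v) false
    let r_max := (PySem.List.pyGet? rs (-1)).getD 0
    let x_min := (PySem.List.pyGet? xs 0).getD 0 - r_max
    let x_max := (PySem.List.pyGet? xs (-1)).getD 0 + r_max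
    let y_min := (PySem.List.pyGet? ys 0).getD 0 - r_max
    let y_max := (PySem.List.pyGet? ys (-1)).getD 0 + r_max
    (x_min, y_min, x_max - x_min, y_max - y_min)

-- ===== PRECONDITION & SPEC =====
def Spec_calcular_bbox_semaforo_py (grupo_circulos : List (Int × Int × Int)) (out : Int × Int × Int × Int) : Prop := out = calcular_bbox_semaforo_py_alt grupo_circulos
instance (grupo_circulos : List (Int × Int × Int)) (out : Int × Int × Int × Int) : Decidable (Spec_calcular_bbox_semaforo_py grupo_circulos out) := by unfold Spec_calcular_bbox_semaforo_py; infer_instance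

-- ===== CLAIM (what is proved, stated in full; the proofs are below) =====
def Claim_equal_calcular_bbox_semaforo_py : Prop := ∀ (grupo_circulos : List (Int × Int × Int)), Dom_calcular_bbox_semaforo_py grupo_circulos → Spec_calcular_bbox_semaforo_py grupo_circulos (calcular_bbox_semaforo_py grupo_circulos)

-- ===== LEMMAS AND PROOFS =====

theorem foldl_min_mem (t : List Int) (x : Int) : t.foldl min x ∈ x :: t := by
  induction t generalizing x with
  | nil => simp
  | cons h t ih =>
    have hm := ih (min x h)
    show List.foldl min (min x h) t ∈ x :: h :: t
    rcases List.mem_cons.mp hm with h1 | h2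
    · rw [h1]; rcases min_choice x h with hc | hc <;> simp [hc]
    · exact List.mem_cons_of_mem _ (List.mem_cons_of_mem _ h2)

theorem foldl_min_le (t : List Int) (x : Int) : ∀ y ∈ x :: t, t.foldl min x ≤ y := by
  induction t generalizing x with
  | nil => simp
  | cons h t ih =>
    intro y hy
    show List.foldl min (min x h) t ≤ y
    rcases List.mem_cons.mp hy with h1 | h2
    · rw [h1]
      exact le_trans (ih (min x h) _ List.mem_cons_self) (min_le_left x h)
    · rcases List.mem_cons.mp h2 with h3 | h4
      · rw [h3]
        exact le_trans (ih (min x h) _ List.mem_cons_self) (min_le_right x h)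
      · exact ih (min x h) y (List.mem_cons_of_mem _ h4)

theorem foldl_max_mem (t : List Int) (x : Int) : t.foldl max x ∈ x :: t := by
  induction t generalizing x with
  | nil => simp
  | cons h t ih =>
    have hm := ih (max x h)
    show List.foldl max (max x h) t ∈ x :: h :: t
    rcases List.mem_cons.mp hm with h1 | h2
    · rw [h1]; rcases max_choice x h with hc | hc <;> simp [hc]
    · exact List.mem_cons_of_mem _ (List.mem_cons_of_mem _ h2)

theorem foldl_max_ge (t : List Int) (x : Int) : ∀ y ∈ x :: t, y ≤ t.foldl max x := by
  induction t generalizing x with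
  | nil => simp
  | cons h t ih =>
    intro y hy
    show y ≤ List.foldl max (max x h) t
    rcases List.mem_cons.mp hy with h1 | h2
    · rw [h1]
      exact le_trans (le_max_left x h) (ih (max x h) _ List.mem_cons_self)
    · rcases List.mem_cons.mp h2 with h3 | h4
      · rw [h3]
        exact le_trans (le_max_right x h) (ih (max x h) _ List.mem_cons_self)
      · exact ih (max x h) y (List.mem_cons_of_mem _ h4)

/-- In a `≤`-sorted list every element is at most the last one. -/
theorem pairwise_le_getLast (s : List Int) (hp : s.Pairwise (· ≤ ·)) (hne : s ≠ []) :
    ∀ y ∈ s, y ≤ s.getLast hne := by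
  induction s with
  | nil => simp at hne
  | cons a t ih =>
    intro y hy
    cases t with
    | nil =>
      simp at hy
      simp [hy, List.getLast]
    | cons b u =>
      have hp' := List.pairwise_cons.mp hp
      rw [List.getLast_cons (by simp)]
      rcases List.mem_cons.mp hy with h1 | h2
      · exact h1 ▸ le_trans (hp'.1 b List.mem_cons_self)
          (ih hp'.2 (by simp) b List.mem_cons_self)
      · exact ih hp'.2 (by simp) y h2

/-- xs[0] of sorted(x::t) is the running minimum. -/
theorem head_sorted_eq_foldl_min (x : Int) (t : List Int) :
    (PySem.List.pyGet? (PySem.List.sorted (x :: t) (fun v => v) false) 0).getD 0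
      = t.foldl min x := by
  rcases hs : PySem.List.sorted (x :: t) (fun v => v) false with _ | ⟨m, rest⟩
  · exact absurd ((PySem.List.sorted_eq_nil_iff (x :: t) (fun v => v) false).mp hs)
      (List.cons_ne_nil x t)
  · have hmle : ∀ y ∈ x :: t, m ≤ y :=
      PySem.List.key_head_sorted_le (x :: t) (fun v => v) hs
    have hmem : m ∈ x :: t := by
      have h1 : m ∈ PySem.List.sorted (x :: t) (fun v => v) false := by
        rw [hs]; exact List.mem_cons_self
      exact (PySem.List.mem_sorted (x :: t) (fun v => v) false m).mp h1
    have h1 : m ≤ t.foldl min x := hmle _ (foldl_min_mem t x)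
    have h2 : t.foldl min x ≤ m := foldl_min_le t x m hmem
    simp [le_antisymm h2 h1]

/-- xs[-1] of sorted(x::t) is the running maximum. -/
theorem last_sorted_eq_foldl_max (x : Int) (t : List Int) :
    (PySem.List.pyGet? (PySem.List.sorted (x :: t) (fun v => v) false) (-1)).getD 0
      = t.foldl max x := by
  rcases hs : PySem.List.sorted (x :: t) (fun v => v) false with _ | ⟨m, rest⟩
  · exact absurd ((PySem.List.sorted_eq_nil_iff (x :: t) (fun v => v) false).mp hs)
      (List.cons_ne_nil x t)
  · have hne : (m :: rest) ≠ ([] : List Int) := List.cons_ne_nil m rest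
    have hp : (m :: rest).Pairwise (· ≤ ·) := by
      have := PySem.List.sorted_pairwise (x :: t) (fun v => v)
      rw [hs] at this
      exact this
    have hmem : (m :: rest).getLast hne ∈ x :: t := by
      have h1 : (m :: rest).getLast hne ∈ PySem.List.sorted (x :: t) (fun v => v) false := by
        rw [hs]; exact List.getLast_mem hne
      exact (PySem.List.mem_sorted (x :: t) (fun v => v) false _).mp h1
    have hgle : ∀ y ∈ x :: t, y ≤ (m :: rest).getLast hne := by
      intro y hy
      have hy' : y ∈ m :: rest := by
        have h0 := (PySem.List.mem_sorted (x :: t) (fun v => v) false y).mpr hy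
        rw [hs] at h0
        exact h0
      exact pairwise_le_getLast (m :: rest) hp hne y hy'
    have h1 : (m :: rest).getLast hne ≤ t.foldl max x := foldl_max_ge t x _ hmem
    have h2 : t.foldl max x ≤ (m :: rest).getLast hne := hgle _ (foldl_max_mem t x)
    rw [PySem.List.pyGet?_neg_one, List.getLast?_eq_some_getLast hne]
    simp [le_antisymm h1 h2]

theorem calcular_bbox_agree (g : List (Int × Int × Int)) :
    calcular_bbox_semaforo_py g = calcular_bbox_semaforo_py_alt g := by
  cases g with
  | nil => rfl
  | cons h t =>
    obtain ⟨x0, y0, r0⟩ := h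
    simp only [calcular_bbox_semaforo_py, calcular_bbox_semaforo_py_alt,
      if_neg (List.cons_ne_nil _ _), List.map_cons,
      head_sorted_eq_foldl_min, last_sorted_eq_foldl_max,
      PySem.List.min?_id_cons, PySem.List.max?_id_cons, Option.getD_some]

-- ===== VERDICT (by name: the statement is the Claim_ definition above) =====
theorem calcular_bbox_semaforo_py_spec : Claim_equal_calcular_bbox_semaforo_py := by
  intro g _
  exact (calcular_bbox_agree g).symm ▸ rfl
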